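-- pv_equiv track=rewrite | github.com/VolatileDream/advent-of-code | 2024/day-02/main.py | check
-- ===== SOURCE A (Python) =====
-- def sign(n):
--   if n < 0:
--     return -1
--   elif n > 0:
--     return 1
--   else:
--     return 0
--
-- def check(nums):
--   s = sign(nums[0])
--   for n in nums:
--     if sign(n) != s:
--       return False
--     if not (1 <= abs(n) <= 3):
--       return False
--   return True
-- ===== SOURCE B (Python) =====
-- def check(nums):
--   lo, hi = min(nums), max(nums)
--   return (1 <= lo and hi <= 3) or (-3 <= lo and hi <= -1)
-- ===== Notes on version B (the rewrite author's own statement) =====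
-- stated objective: alternative
-- what changed: B drops the sign helper and the short-circuiting per-element scan entirely: it aggregates the list to its minimum and maximum and decides by two interval tests on those aggregates ((1<=min and max<=3) or (-3<=min and max<=-1)), never reading nums[0].
import Mathlib
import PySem

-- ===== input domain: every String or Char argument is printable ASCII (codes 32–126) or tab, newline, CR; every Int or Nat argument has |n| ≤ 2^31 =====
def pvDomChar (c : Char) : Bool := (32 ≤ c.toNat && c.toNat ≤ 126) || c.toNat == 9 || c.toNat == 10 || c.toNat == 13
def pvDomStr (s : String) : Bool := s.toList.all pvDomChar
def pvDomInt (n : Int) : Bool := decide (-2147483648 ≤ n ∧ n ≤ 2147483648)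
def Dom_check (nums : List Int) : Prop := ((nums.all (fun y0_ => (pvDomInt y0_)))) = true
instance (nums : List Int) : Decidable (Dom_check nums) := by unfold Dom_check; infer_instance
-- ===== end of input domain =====

-- B aggregates the list to its minimum and maximum and decides by interval tests on
-- those aggregates, instead of A's sign()+abs() short-circuiting per-element scan
-- (objective: alternative). Pre_check excludes the empty list, on which A raises
-- IndexError (and B's min() raises ValueError).

-- ===== PORT A =====
def sign (n : Int) : Int := if n < 0 then -1 else if n > 0 then 1 else 0

def checkLoop (s : Int) : List Int → Bool
  | [] => true
  | n :: t =>
      if sign n ≠ s then false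
      else if ¬ (1 ≤ |n| ∧ |n| ≤ 3) then false
      else checkLoop s t

def check (nums : List Int) : Bool :=
  match PySem.List.pyGet? nums 0 with
  | none => false   -- unreachable under Pre_check (IndexError in Python)
  | some f => checkLoop (sign f) nums

-- ===== PORT B =====
def check_alt (nums : List Int) : Bool :=
  match PySem.List.min? nums (fun x => x), PySem.List.max? nums (fun x => x) with
  | some lo, some hi =>
      ((1 ≤ lo) && (hi ≤ 3)) || ((-3 ≤ lo) && (hi ≤ -1))
  | _, _ => false   -- unreachable under Pre_check (ValueError in Python)

-- ===== PRECONDITION & SPEC =====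
-- Pre_check: A raises IndexError on the empty list (and B's min() raises ValueError).
def Pre_check (nums : List Int) : Prop := nums ≠ []
instance (nums : List Int) : Decidable (Pre_check nums) := by unfold Pre_check; infer_instance
def pvWitness_check : List Int := [1, 2, 3]
def Spec_check (nums : List Int) (out : Bool) : Prop := out = check_alt nums
instance (nums : List Int) (out : Bool) : Decidable (Spec_check nums out) := by unfold Spec_check; infer_instance

-- ===== CLAIM =====
def Claim_equal_check : Prop := ∀ (nums : List Int), Dom_check nums → Pre_check nums → Spec_check nums (check nums)

-- ===== LEMMAS AND PROOFS =====
theorem checkLoop_pos (l : List Int) :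
    checkLoop 1 l = l.all (fun n => decide (1 ≤ n ∧ n ≤ 3)) := by
  induction l with
  | nil => rfl
  | cons n t ih =>
    rw [List.all_cons, ← ih]
    by_cases hn : n < 0
    · have h1 : sign n = -1 := by simp [sign, hn]
      have h2 : decide ((1:Int) ≤ n ∧ n ≤ 3) = false := by simp; omega
      simp [checkLoop, h1, h2]
    · by_cases hp : (0:Int) < n
      · have h1 : sign n = 1 := by simp [sign]; omega
        have habs : |n| = n := abs_of_nonneg (by omega)
        by_cases hr : (1:Int) ≤ n ∧ n ≤ 3
        · have h2 : decide ((1:Int) ≤ n ∧ n ≤ 3) = true := by simp [hr]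
          simp [checkLoop, h1, habs, hr]
        · have h2 : decide ((1:Int) ≤ n ∧ n ≤ 3) = false := by
            simp only [decide_eq_false_iff_not]; exact hr
          simp [checkLoop, h1, habs, hr]
      · have hz : n = 0 := by omega
        subst hz
        simp [checkLoop, sign]

theorem checkLoop_neg (l : List Int) :
    checkLoop (-1) l = l.all (fun n => decide (-3 ≤ n ∧ n ≤ -1)) := by
  induction l with
  | nil => rfl
  | cons n t ih =>
    rw [List.all_cons, ← ih]
    by_cases hn : n < 0
    · have h1 : sign n = -1 := by simp [sign, hn]
      have habs : |n| = -n := abs_of_neg hn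
      by_cases hr : (-3:Int) ≤ n ∧ n ≤ -1
      · have h2 : decide ((-3:Int) ≤ n ∧ n ≤ -1) = true := by simp [hr]
        have hb : (1 ≤ |n| ∧ |n| ≤ 3) := by rw [habs]; omega
        simp [checkLoop, h1, hb, h2]
      · have h2 : decide ((-3:Int) ≤ n ∧ n ≤ -1) = false := by
          simp only [decide_eq_false_iff_not]; exact hr
        have hb : ¬ (1 ≤ |n| ∧ |n| ≤ 3) := by rw [habs]; omega
        simp [checkLoop, h1, hb, h2]
    · have h1 : sign n ≠ -1 := by simp [sign, hn]; omega
      have h2 : decide ((-3:Int) ≤ n ∧ n ≤ -1) = false := by simp; omega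
      simp [checkLoop, h1, h2]

-- B in terms of two interval scans: for nonempty lists, the min/max tests are the
-- all-in-[1,3] / all-in-[-3,-1] predicates.
theorem check_alt_char (f : Int) (t : List Int) :
    check_alt (f :: t) =
      ((f :: t).all (fun n => decide (1 ≤ n ∧ n ≤ 3)) ||
       (f :: t).all (fun n => decide (-3 ≤ n ∧ n ≤ -1))) := by
  set l := f :: t with hl
  obtain ⟨lo, hlo⟩ : ∃ lo, PySem.List.min? l (fun x => x) = some lo := by
    cases h : PySem.List.min? l (fun x => x) with
    | none => exact absurd ((PySem.List.min?_eq_none_iff l _).mp h) (by simp [hl])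
    | some lo => exact ⟨lo, rfl⟩
  obtain ⟨hi, hhi⟩ : ∃ hi, PySem.List.max? l (fun x => x) = some hi := by
    cases h : PySem.List.max? l (fun x => x) with
    | none => exact absurd ((PySem.List.max?_eq_none_iff l _).mp h) (by simp [hl])
    | some hi => exact ⟨hi, rfl⟩
  have hlomem : lo ∈ l := PySem.List.min?_mem hlo
  have hhimem : hi ∈ l := PySem.List.max?_mem hhi
  have hlomin : ∀ y ∈ l, lo ≤ y := PySem.List.min?_isMin hlo
  have hhimax : ∀ y ∈ l, y ≤ hi := PySem.List.max?_isMax hhi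
  unfold check_alt
  rw [hlo, hhi]
  by_cases h13 : l.all (fun n => decide (1 ≤ n ∧ n ≤ 3)) = true
  · have h1 : 1 ≤ lo ∧ lo ≤ 3 := by simpa using (List.all_eq_true.mp h13) lo hlomem
    have h2 : 1 ≤ hi ∧ hi ≤ 3 := by simpa using (List.all_eq_true.mp h13) hi hhimem
    simp [h1.1, h2.2]
    exact Or.inl (fun x hx => by simpa using (List.all_eq_true.mp h13) x hx)
  · by_cases hneg : l.all (fun n => decide (-3 ≤ n ∧ n ≤ -1)) = true
    · have h1 : -3 ≤ lo ∧ lo ≤ -1 := by simpa using (List.all_eq_true.mp hneg) lo hlomem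
      have h2 : -3 ≤ hi ∧ hi ≤ -1 := by simpa using (List.all_eq_true.mp hneg) hi hhimem
      simp [h1.1, h2.2]
      exact Or.inr (fun x hx => by simpa using (List.all_eq_true.mp hneg) x hx)
    · rw [Bool.not_eq_true] at h13 hneg
      obtain ⟨x, hx, hx13⟩ := List.all_eq_false.mp h13
      obtain ⟨y, hy, hyneg⟩ := List.all_eq_false.mp hneg
      simp at hx13 hyneg
      have h1x := hlomin x hx
      have h2x := hhimax x hx
      have h1y := hlomin y hy
      have h2y := hhimax y hy
      rw [h13, hneg, Bool.or_self]
      simp only [Bool.or_eq_false_iff, Bool.and_eq_false_iff, decide_eq_false_iff_not]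
      omega

-- ===== VERDICT =====
theorem check_spec : Claim_equal_check := by
  intro nums _ hpre
  unfold Spec_check
  match nums, hpre with
  | f :: t, _ =>
    rw [check_alt_char]
    unfold check
    have hget : PySem.List.pyGet? (f :: t) 0 = some f := by
      simp [PySem.List.pyGet?, PySem.List.pyIdx?]
    rw [hget]
    by_cases hf : (0:Int) < f
    · have hs : sign f = 1 := by simp [sign]; omega
      have e2 : (f :: t).all (fun n => decide (-3 ≤ n ∧ n ≤ -1)) = false := by
        rw [List.all_eq_false]; exact ⟨f, by simp, by simp; omega⟩
      simp only [hs, checkLoop_pos, e2, Bool.or_false]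
    · by_cases hneg : f < 0
      · have hs : sign f = -1 := by simp [sign, hneg]
        have e1 : (f :: t).all (fun n => decide (1 ≤ n ∧ n ≤ 3)) = false := by
          rw [List.all_eq_false]; exact ⟨f, by simp, by simp; omega⟩
        simp only [hs, checkLoop_neg, e1, Bool.false_or]
      · have hf0 : f = 0 := by omega
        subst hf0
        simp [checkLoop, sign]
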